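-- pv_equiv track=rewrite | github.com/nichechristie/luxbin-chain | sound_to_light_luxbin.py | morse_to_wavelengths
-- ===== SOURCE A (Python) =====
-- def morse_to_wavelengths(morse_sequence):
--     """Convert Morse sequence to light wavelengths with timing"""
--     wavelengths = []
--     times = []
--
--     current_time = 0
--     for char in morse_sequence:
--         if char == '.':
--             # Dot: short pulse at specific wavelength
--             wavelengths.append(450)  # Blue for dot
--             times.append((current_time, current_time + 5))
--             current_time += 5 + 5  # dot + gap
--         elif char == '-':
--             # Dash: long pulse
--             wavelengths.append(650)  # Red for dash
--             times.append((current_time, current_time + 15))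
--             current_time += 15 + 5  # dash + gap
--         elif char == ' ':
--             # Character gap
--             current_time += 15
--         elif char == '/':
--             # Word gap
--             current_time += 35
--
--     return wavelengths, times
-- ===== SOURCE B (Python) =====
-- def _dur(c):
--     if c == '.':
--         return 10
--     if c == '-':
--         return 20
--     if c == ' ':
--         return 15
--     if c == '/':
--         return 35
--     return 0
--
-- def morse_to_wavelengths(morse_sequence):
--     """Convert Morse sequence to light wavelengths with timing"""
--     # Build the output back-to-front: first the total duration, then walk the
--     # string in reverse, subtracting each character's duration to recover its
--     # start time, prepending pulses (via reversed lists).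
--     end = sum(_dur(c) for c in morse_sequence)
--     w_rev = []
--     t_rev = []
--     for c in reversed(morse_sequence):
--         end -= _dur(c)
--         if c == '.':
--             w_rev.append(450)
--             t_rev.append((end, end + 5))
--         elif c == '-':
--             w_rev.append(650)
--             t_rev.append((end, end + 15))
--     return w_rev[::-1], t_rev[::-1]
-- ===== Notes on version B (the rewrite author's own statement) =====
-- stated objective: alternative
-- what changed: Builds the output back-to-front: computes the total duration first, then traverses the string in REVERSE, subtracting each character's duration to recover its start time and collecting pulses in reverse order, finally reversing the two lists; A threads a forward running clock.
import Mathlib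
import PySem

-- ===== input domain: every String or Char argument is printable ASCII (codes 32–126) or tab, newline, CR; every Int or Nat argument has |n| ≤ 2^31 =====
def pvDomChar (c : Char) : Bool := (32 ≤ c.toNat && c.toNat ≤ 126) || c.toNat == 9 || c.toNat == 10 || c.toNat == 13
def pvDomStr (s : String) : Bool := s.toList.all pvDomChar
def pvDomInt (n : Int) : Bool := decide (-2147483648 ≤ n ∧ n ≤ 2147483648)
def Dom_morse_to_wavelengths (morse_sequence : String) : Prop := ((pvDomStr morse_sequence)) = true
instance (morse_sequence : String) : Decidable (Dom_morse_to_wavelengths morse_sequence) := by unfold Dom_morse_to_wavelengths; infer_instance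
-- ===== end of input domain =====

-- B builds the output back-to-front: total duration first, then a reverse traversal
-- subtracting durations to recover start times (alternative decomposition, same cost).


-- ===== PORT A =====
-- one step of A's loop over the state (wavelengths, times, current_time)
def pvAStep (st : List Int × List (Int × Int) × Int) (c : Char) :
    List Int × List (Int × Int) × Int :=
  let (w, t, ct) := st
  if c = '.' then (w ++ [450], t ++ [(ct, ct + 5)], ct + (5 + 5))
  else if c = '-' then (w ++ [650], t ++ [(ct, ct + 15)], ct + (15 + 5))
  else if c = ' ' then (w, t, ct + 15)
  else if c = '/' then (w, t, ct + 35)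
  else (w, t, ct)

def morse_to_wavelengths (morse_sequence : String) : List Int × (List (Int × Int)) :=
  let st := morse_sequence.toList.foldl pvAStep ([], [], 0)
  (st.1, st.2.1)

-- ===== PORT B =====
-- the duration table _dur
def pvDur (c : Char) : Int :=
  if c = '.' then 10 else if c = '-' then 20 else if c = ' ' then 15
  else if c = '/' then 35 else 0

-- one step of B's reverse loop over the state (end, w_rev, t_rev)
def pvBStep (st : Int × List Int × List (Int × Int)) (c : Char) :
    Int × List Int × List (Int × Int) :=
  let (e, w, t) := st
  let e' := e - pvDur c
  if c = '.' then (e', w ++ [450], t ++ [(e', e' + 5)])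
  else if c = '-' then (e', w ++ [650], t ++ [(e', e' + 15)])
  else (e', w, t)

def morse_to_wavelengths_alt (morse_sequence : String) : List Int × (List (Int × Int)) :=
  let cs := morse_sequence.toList
  let total := (cs.map pvDur).sum
  let st := cs.reverse.foldl pvBStep (total, [], [])
  (st.2.1.reverse, st.2.2.reverse)

-- ===== PRECONDITION & SPEC =====
def Spec_morse_to_wavelengths (morse_sequence : String) (out : List Int × (List (Int × Int))) : Prop := out = morse_to_wavelengths_alt morse_sequence
instance (morse_sequence : String) (out : List Int × (List (Int × Int))) : Decidable (Spec_morse_to_wavelengths morse_sequence out) := by unfold Spec_morse_to_wavelengths; infer_instance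

-- ===== CLAIM =====
def Claim_equal_morse_to_wavelengths : Prop := ∀ (morse_sequence : String), Dom_morse_to_wavelengths morse_sequence → Spec_morse_to_wavelengths morse_sequence (morse_to_wavelengths morse_sequence)

-- ===== LEMMAS AND PROOFS =====

-- the wavelengths A emits for a character list
def pvEmitW : List Char → List Int
  | [] => []
  | c :: cs =>
      (if c = '.' then [(450 : Int)] else if c = '-' then [650] else []) ++ pvEmitW cs

-- the time pairs A emits for a character list starting at clock ct
def pvEmitT : List Char → Int → List (Int × Int)
  | [], _ => []
  | c :: cs, ct =>
      (if c = '.' then [((ct : Int), ct + 5)] else if c = '-' then [(ct, ct + 15)] else [])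
        ++ pvEmitT cs (ct + pvDur c)

theorem pvEmitW_append (a b : List Char) : pvEmitW (a ++ b) = pvEmitW a ++ pvEmitW b := by
  induction a with
  | nil => simp [pvEmitW]
  | cons c a ih => simp [pvEmitW, ih]

theorem pvEmitT_append (a b : List Char) (ct : Int) :
    pvEmitT (a ++ b) ct = pvEmitT a ct ++ pvEmitT b (ct + (a.map pvDur).sum) := by
  induction a generalizing ct with
  | nil => simp [pvEmitT]
  | cons c a ih => simp [pvEmitT, ih, add_assoc]

theorem pvA_main (cs : List Char) (w : List Int) (t : List (Int × Int)) (ct : Int) :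
    cs.foldl pvAStep (w, t, ct) =
      (w ++ pvEmitW cs, t ++ pvEmitT cs ct, ct + (cs.map pvDur).sum) := by
  induction cs generalizing w t ct with
  | nil => simp [pvEmitW, pvEmitT]
  | cons c cs ih =>
    simp only [List.foldl_cons, pvAStep, List.map_cons, List.sum_cons]
    split_ifs <;>
      rw [ih] <;>
      simp [pvEmitW, pvEmitT, pvDur, *, List.append_assoc] <;> ring_nf

theorem pvB_main (l : List Char) (e : Int) (w : List Int) (t : List (Int × Int)) :
    l.foldl pvBStep (e, w, t) =
      (e - (l.map pvDur).sum,
       w ++ (pvEmitW l.reverse).reverse,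
       t ++ (pvEmitT l.reverse (e - (l.map pvDur).sum)).reverse) := by
  induction l generalizing e w t with
  | nil => simp [pvEmitW, pvEmitT]
  | cons c l ih =>
    simp only [List.foldl_cons, pvBStep, List.map_cons, List.sum_cons, List.reverse_cons]
    rw [ih, pvEmitW_append, pvEmitT_append]
    have hs : (l.reverse.map pvDur).sum = (l.map pvDur).sum := by
      rw [List.map_reverse, List.sum_reverse]
    split_ifs <;>
      simp [pvEmitW, pvEmitT, pvDur, *, List.append_assoc] <;>
      constructor <;> first | rfl | (constructor <;> first | rfl | ring_nf) | ring_nf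

-- ===== VERDICT =====
theorem morse_to_wavelengths_spec : Claim_equal_morse_to_wavelengths := by
  intro s _
  unfold Spec_morse_to_wavelengths morse_to_wavelengths morse_to_wavelengths_alt
  simp only [pvA_main, pvB_main, List.map_reverse, List.sum_reverse, List.reverse_reverse,
    List.nil_append, sub_self]
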